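-- pv_equiv track=rewrite | github.com/jmiller9930/blackbox | renaissance_v4/game_theory/student_proctor/learning_memory_promotion_v1.py | aggregate_run_memory_decision_v1
-- ===== SOURCE A (Python) =====
-- GOVERNANCE_PROMOTE = "promote"
--
-- GOVERNANCE_HOLD = "hold"
--
-- GOVERNANCE_REJECT = "reject"
--
-- def aggregate_run_memory_decision_v1(decisions: list[str]) -> str:
--     """Worst wins: reject > hold > promote."""
--     s = {str(d).strip().lower() for d in decisions if str(d).strip()}
--     if not s:
--         return GOVERNANCE_HOLD
--     if GOVERNANCE_REJECT in s:
--         return GOVERNANCE_REJECT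
--     if GOVERNANCE_HOLD in s:
--         return GOVERNANCE_HOLD
--     return GOVERNANCE_PROMOTE
-- ===== SOURCE B (Python) =====
-- GOVERNANCE_PROMOTE = "promote"
-- GOVERNANCE_HOLD = "hold"
-- GOVERNANCE_REJECT = "reject"
--
-- def _norm(d):
--     return str(d).strip().lower()
--
-- def aggregate_run_memory_decision_v1(decisions: list[str]) -> str:
--     """Worst wins: reject > hold > promote. Single accumulating pass, no set."""
--     worst = -1  # -1 nothing seen, 0 promote/other, 1 hold, 2 reject
--     for d in decisions:
--         t = _norm(d)
--         if not t:
--             continue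
--         r = 2 if t == GOVERNANCE_REJECT else 1 if t == GOVERNANCE_HOLD else 0
--         if r > worst:
--             worst = r
--         if worst == 2:
--             break
--     if worst < 0:
--         return GOVERNANCE_HOLD
--     return [GOVERNANCE_PROMOTE, GOVERNANCE_HOLD, GOVERNANCE_REJECT][worst]
-- ===== Notes on version B (the rewrite author's own statement) =====
-- stated objective: alternative
-- what changed: Replaced the set comprehension plus three ordered membership checks with a single accumulating pass keeping a running worst-rank integer (reject=2, hold=1, other=0, nothing seen=-1) with early exit on reject, then a table lookup for the result.
import Mathlib
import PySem

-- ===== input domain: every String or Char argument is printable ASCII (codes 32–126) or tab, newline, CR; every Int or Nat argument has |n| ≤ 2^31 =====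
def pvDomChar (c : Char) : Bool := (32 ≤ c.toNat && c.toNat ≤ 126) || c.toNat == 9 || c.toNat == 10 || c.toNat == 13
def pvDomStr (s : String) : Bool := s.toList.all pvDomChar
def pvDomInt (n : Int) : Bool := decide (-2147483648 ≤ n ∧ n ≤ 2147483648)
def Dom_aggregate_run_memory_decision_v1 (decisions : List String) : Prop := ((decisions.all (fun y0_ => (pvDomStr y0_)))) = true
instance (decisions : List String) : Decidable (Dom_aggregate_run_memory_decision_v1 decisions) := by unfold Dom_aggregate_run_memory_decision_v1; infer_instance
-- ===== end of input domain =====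

-- B replaces A's set comprehension + ordered membership checks by a single accumulating
-- worst-rank pass (with early exit on reject) and a final table lookup (objective: alternative).

-- shared helper: str(d).strip().lower()
def pvNorm (d : String) : String := PySem.Str.lower (PySem.Str.strip d)

-- ===== PORT A =====
-- the token list of A's comprehension, before set construction
def pvToks (l : List String) : List String :=
  l.filterMap (fun d => if PySem.Str.strip d = "" then none else some (pvNorm d))

def aggregate_run_memory_decision_v1 (decisions : List String) : String :=
  let s : PySem.Set String := PySem.Set.ofList (pvToks decisions)
  if s = [] then "hold"
  else if PySem.Set.contains s "reject" then "reject"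
  else if PySem.Set.contains s "hold" then "hold"
  else "promote"

-- ===== PORT B =====
-- r = 2 if t == "reject" else 1 if t == "hold" else 0
def pvRk (d : String) : Int := if pvNorm d = "reject" then 2 else if pvNorm d = "hold" then 1 else 0

def pvAltLoop : List String → Int → Int
  | [], worst => worst
  | d :: rest, worst =>
    if pvNorm d = "" then pvAltLoop rest worst
    else
      let worst' := if pvRk d > worst then pvRk d else worst
      if worst' = 2 then worst' else pvAltLoop rest worst'

def aggregate_run_memory_decision_v1_alt (decisions : List String) : String :=
  let worst := pvAltLoop decisions (-1)
  if worst < 0 then "hold"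
  else PySem.List.pyGetD ["promote", "hold", "reject"] worst "hold"

-- ===== PRECONDITION & SPEC =====
def Spec_aggregate_run_memory_decision_v1 (decisions : List String) (out : String) : Prop := out = aggregate_run_memory_decision_v1_alt decisions
instance (decisions : List String) (out : String) : Decidable (Spec_aggregate_run_memory_decision_v1 decisions out) := by unfold Spec_aggregate_run_memory_decision_v1; infer_instance

-- ===== CLAIM (what is proved, stated in full; the proofs are below) =====
def Claim_equal_aggregate_run_memory_decision_v1 : Prop := ∀ (decisions : List String), Dom_aggregate_run_memory_decision_v1 decisions → Spec_aggregate_run_memory_decision_v1 decisions (aggregate_run_memory_decision_v1 decisions)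

-- ===== LEMMAS AND PROOFS =====

-- worst rank of a list: -1 if no nonempty token, else max of the token ranks
def pvRank : List String → Int
  | [] => -1
  | d :: rest => if pvNorm d = "" then pvRank rest else max (pvRk d) (pvRank rest)

lemma pvRk_bounds (d : String) : 0 ≤ pvRk d ∧ pvRk d ≤ 2 := by
  unfold pvRk; split_ifs <;> omega

lemma pvRank_cons_ne {d : String} (rest : List String) (h : pvNorm d ≠ "") :
    pvRank (d :: rest) = max (pvRk d) (pvRank rest) := by simp [pvRank, h]

lemma pvRank_cons_eq {d : String} (rest : List String) (h : pvNorm d = "") :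
    pvRank (d :: rest) = pvRank rest := by simp [pvRank, h]

lemma pvRank_bounds (l : List String) : -1 ≤ pvRank l ∧ pvRank l ≤ 2 := by
  induction l with
  | nil => simp [pvRank]
  | cons d rest ih =>
    by_cases h : pvNorm d = ""
    · rw [pvRank_cons_eq rest h]; exact ih
    · rw [pvRank_cons_ne rest h]
      exact ⟨le_trans ih.1 (le_max_right _ _), max_le (pvRk_bounds d).2 ih.2⟩

lemma pvLower_empty_iff (s : String) : PySem.Str.lower s = "" ↔ s = "" := by
  constructor
  · intro h
    have h2 : PySem.Chars.lower s.toList = ([] : List Char) := by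
      rw [← PySem.Str.toList_lower, h]; rfl
    have h3 : s.toList = [] := by
      have hmap : (s.toList.map PySem.Chars.lowerChar) = [] := h2
      simpa using hmap
    exact String.toList_eq_nil_iff.mp h3
  · intro h; subst h; rfl

lemma pvNorm_empty_iff (d : String) : pvNorm d = "" ↔ PySem.Str.strip d = "" := by
  simp [pvNorm, pvLower_empty_iff]

lemma pvToks_cons (d : String) (rest : List String) :
    pvToks (d :: rest) = if pvNorm d = "" then pvToks rest else pvNorm d :: pvToks rest := by
  simp only [pvToks, List.filterMap_cons, ← pvNorm_empty_iff]
  split_ifs <;> rfl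

lemma pvToks_nil_iff (l : List String) : pvToks l = [] ↔ pvRank l = -1 := by
  induction l with
  | nil => simp [pvToks, pvRank]
  | cons d rest ih =>
    rw [pvToks_cons]
    by_cases h : pvNorm d = ""
    · rw [if_pos h, pvRank_cons_eq rest h]; exact ih
    · rw [if_neg h, pvRank_cons_ne rest h]
      have h1 := pvRk_bounds d
      have h2 := le_max_left (pvRk d) (pvRank rest)
      constructor
      · intro hc; exact absurd hc (by simp)
      · intro hr; omega
  
lemma pvMem_reject_iff (l : List String) : "reject" ∈ pvToks l ↔ pvRank l = 2 := by
  induction l with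
  | nil => simp [pvToks, pvRank]
  | cons d rest ih =>
    rw [pvToks_cons]
    by_cases h : pvNorm d = ""
    · rw [if_pos h, pvRank_cons_eq rest h]; exact ih
    · rw [if_neg h, pvRank_cons_ne rest h]
      have hb := pvRank_bounds rest
      by_cases hr : pvNorm d = "reject"
      · have h2 : pvRk d = 2 := by simp [pvRk, hr]
        simp [hr, h2, max_eq_left hb.2]
      · have hrk : pvRk d ≤ 1 := by simp only [pvRk, if_neg hr]; split_ifs <;> omega
        simp only [List.mem_cons]
        constructor
        · rintro (he | hm)
          · exact absurd he.symm hr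
          · rw [ih.mp hm, max_eq_right (le_trans hrk (by omega))]
        · intro h2; right; apply ih.mpr
          rcases max_cases (pvRk d) (pvRank rest) with ⟨he, hle⟩ | ⟨he, hle⟩ <;>
            rw [he] at h2 <;> omega

lemma pvMem_hold_iff (l : List String) (hnr : "reject" ∉ pvToks l) :
    "hold" ∈ pvToks l ↔ pvRank l = 1 := by
  induction l with
  | nil => simp [pvToks, pvRank]
  | cons d rest ih =>
    rw [pvToks_cons] at *
    by_cases h : pvNorm d = ""
    · rw [if_pos h] at *; rw [pvRank_cons_eq rest h]; exact ih hnr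
    · rw [if_neg h] at *; rw [pvRank_cons_ne rest h]
      simp only [List.mem_cons] at hnr
      rw [not_or] at hnr
      have hnr2 : pvRank rest ≠ 2 := fun hc => hnr.2 ((pvMem_reject_iff rest).mpr hc)
      have hb := pvRank_bounds rest
      have hdr : pvNorm d ≠ "reject" := fun hc => hnr.1 hc.symm
      by_cases hh : pvNorm d = "hold"
      · have h1 : pvRk d = 1 := by simp [pvRk, hh]
        simp [hh, h1, max_eq_left (by omega : pvRank rest ≤ 1)]
      · have h0 : pvRk d = 0 := by simp [pvRk, hdr, hh]
        rw [h0]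
        simp only [List.mem_cons]
        constructor
        · rintro (he | hm)
          · exact absurd he.symm hh
          · rw [(ih hnr.2).mp hm, max_eq_right (by omega : (0:Int) ≤ 1)]
        · intro h2; right; apply (ih hnr.2).mpr
          rcases max_cases (0 : Int) (pvRank rest) with ⟨he, hle⟩ | ⟨he, hle⟩ <;>
            rw [he] at h2 <;> omega

lemma pvAltLoop_eq (l : List String) : ∀ w : Int, -1 ≤ w → w ≤ 2 → pvAltLoop l w = max w (pvRank l) := by
  induction l with
  | nil => intro w h1 h2; simp only [pvAltLoop, pvRank]; omega
  | cons d rest ih =>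
    intro w h1 h2
    have hb := pvRank_bounds rest
    have hk := pvRk_bounds d
    simp only [pvAltLoop]
    by_cases h : pvNorm d = ""
    · rw [if_pos h, pvRank_cons_eq rest h]; exact ih w h1 h2
    · rw [if_neg h, pvRank_cons_ne rest h]
      split_ifs with hgt h2' h2'
      · simp only [max_def]; split_ifs <;> omega
      · rw [ih _ (by omega) (by omega)]; simp only [max_def]; split_ifs <;> omega
      · simp only [max_def]; split_ifs <;> omega
      · rw [ih _ (by omega) (by omega)]; simp only [max_def]; split_ifs <;> omega

lemma pvOfList_nil_iff (xs : List String) : PySem.Set.ofList xs = ([] : List String) ↔ xs = [] := by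
  constructor
  · intro h
    cases xs with
    | nil => rfl
    | cons x t =>
      exfalso
      have hx : x ∈ PySem.Set.ofList (x :: t) := (PySem.Set.mem_ofList _ _).mpr (by simp)
      rw [h] at hx; exact absurd hx (by simp)
  · intro h; subst h; rfl

lemma pvContains_iff (xs : List String) (x : String) :
    (PySem.Set.contains (PySem.Set.ofList xs) x = true) ↔ x ∈ xs := by
  simp [PySem.Set.contains, PySem.Set.mem_ofList]

-- ===== VERDICT (by name: the statement is the Claim_ definition above) =====
theorem aggregate_run_memory_decision_v1_spec : Claim_equal_aggregate_run_memory_decision_v1 := by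
  intro decisions _
  unfold Spec_aggregate_run_memory_decision_v1
  have hb := pvRank_bounds decisions
  have hw : pvAltLoop decisions (-1) = pvRank decisions := by
    rw [pvAltLoop_eq decisions (-1) (by omega) (by omega), max_eq_right hb.1]
  simp only [aggregate_run_memory_decision_v1, aggregate_run_memory_decision_v1_alt, hw]
  by_cases h0 : pvToks decisions = []
  · have hr : pvRank decisions = -1 := (pvToks_nil_iff decisions).mp h0
    rw [h0, hr]
    norm_num [PySem.Set.ofList]
  · have hne : PySem.Set.ofList (pvToks decisions) ≠ [] :=
      fun hc => h0 ((pvOfList_nil_iff _).mp hc)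
    rw [if_neg hne]
    by_cases hrj : "reject" ∈ pvToks decisions
    · have hr : pvRank decisions = 2 := (pvMem_reject_iff decisions).mp hrj
      rw [if_pos ((pvContains_iff _ _).mpr hrj), hr]
      rfl
    · rw [if_neg (fun hc => hrj ((pvContains_iff _ _).mp hc))]
      by_cases hhd : "hold" ∈ pvToks decisions
      · have hr : pvRank decisions = 1 := (pvMem_hold_iff decisions hrj).mp hhd
        rw [if_pos ((pvContains_iff _ _).mpr hhd), hr]
        rfl
      · have hr1 : pvRank decisions ≠ 1 := fun hc => hhd ((pvMem_hold_iff decisions hrj).mpr hc)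
        have hr2 : pvRank decisions ≠ 2 := fun hc => hrj ((pvMem_reject_iff decisions).mpr hc)
        have hrn : pvRank decisions ≠ -1 := fun hc => h0 ((pvToks_nil_iff decisions).mpr hc)
        have hr : pvRank decisions = 0 := by omega
        rw [if_neg (fun hc => hhd ((pvContains_iff _ _).mp hc)), hr]
        rfl
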